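-- pv_equiv track=rewrite | github.com/sufiyankureshi688/AI-Native-Desktop-Environment | window_manager.py | _find_window_by_name
-- ===== SOURCE A (Python) =====
-- from typing import Dict, List, Tuple, Optional, Union
--
-- def _find_window_by_name(windows: List[Dict], name: str) -> Optional[Dict]:
--     """Find window by name or application"""
--     name_lower = name.lower()
--
--     # Exact title match
--     for window in windows:
--         if name_lower in window.get('title', '').lower():
--             return window
--
--     # Application class match
--     for window in windows:
--         if name_lower in window.get('class', '').lower():
--             return window
--
--     # Fuzzy match
--     for window in windows:
--         title = window.get('title', '').lower()
--         app_class = window.get('class', '').lower()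
--         if any(word in title or word in app_class for word in name_lower.split()):
--             return window
--
--     return None
-- ===== SOURCE B (Python) =====
-- def _find_window_by_name(windows, name):
--     """Find window by name or application: one pass keeping priority candidates."""
--     name_lower = name.lower()
--     words = name_lower.split()
--     first_class = None
--     first_fuzzy = None
--     for window in windows:
--         title = window.get('title', '').lower()
--         app_class = window.get('class', '').lower()
--         if name_lower in title:
--             return window
--         elif name_lower in app_class:
--             if first_class is None:
--                 first_class = window
--         elif first_fuzzy is None and any(w in title or w in app_class for w in words):
--             first_fuzzy = window
--     return first_class if first_class is not None else first_fuzzy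
-- ===== Notes on version B (the rewrite author's own statement) =====
-- stated objective: simpler
-- what changed: Replaces A's three sequential scans over windows (title, then class, then fuzzy) with a single pass that returns on a title match and keeps the first class-match and first fuzzy-match candidates, picked by priority after the loop.
import Mathlib
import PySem

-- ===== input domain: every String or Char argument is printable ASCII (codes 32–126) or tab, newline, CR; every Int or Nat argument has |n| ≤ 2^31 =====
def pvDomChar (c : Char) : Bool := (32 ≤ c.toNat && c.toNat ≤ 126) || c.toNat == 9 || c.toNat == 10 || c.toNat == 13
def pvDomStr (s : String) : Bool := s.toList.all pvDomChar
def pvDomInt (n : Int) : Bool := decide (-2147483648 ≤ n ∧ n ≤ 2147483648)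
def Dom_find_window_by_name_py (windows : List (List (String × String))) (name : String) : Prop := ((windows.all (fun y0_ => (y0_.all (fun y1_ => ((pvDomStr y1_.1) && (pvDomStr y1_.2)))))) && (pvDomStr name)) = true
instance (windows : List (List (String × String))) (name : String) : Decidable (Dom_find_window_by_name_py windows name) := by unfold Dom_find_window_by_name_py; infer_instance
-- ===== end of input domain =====

-- B does the same job in one pass with two priority candidates instead of A's three scans; objective: simpler.

-- shared accessor: window.get(k, '').lower()
def getLower (w : List (String × String)) (k : String) : String :=
  PySem.Str.lower (PySem.Dict.getD (PySem.Dict.mk w) k "")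

-- ===== PORT A =====
def find_window_by_name_py (windows : List (List (String × String))) (name : String) : Option (List (String × String)) :=
  let name_lower := PySem.Str.lower name
  -- Exact title match
  match windows.find? (fun w => PySem.Str.isIn name_lower (getLower w "title")) with
  | some w => some w
  | none =>
    -- Application class match
    match windows.find? (fun w => PySem.Str.isIn name_lower (getLower w "class")) with
    | some w => some w
    | none =>
      -- Fuzzy match
      windows.find? (fun w =>
        (PySem.Str.split₀ name_lower).any (fun word =>
          PySem.Str.isIn word (getLower w "title") || PySem.Str.isIn word (getLower w "class")))

-- ===== PORT B =====
-- the single loop of Source B, carrying (first_class, first_fuzzy)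
def fwAltLoop (nl : String) (words : List String)
    (fc ff : Option (List (String × String))) :
    List (List (String × String)) → Option (List (String × String))
  | [] => fc.or ff
  | w :: rest =>
    let title := getLower w "title"
    let app_class := getLower w "class"
    if PySem.Str.isIn nl title then some w
    else if PySem.Str.isIn nl app_class then
      fwAltLoop nl words (if fc.isNone then some w else fc) ff rest
    else if ff.isNone && words.any (fun word => PySem.Str.isIn word title || PySem.Str.isIn word app_class) then
      fwAltLoop nl words fc (some w) rest
    else fwAltLoop nl words fc ff rest

def find_window_by_name_py_alt (windows : List (List (String × String))) (name : String) : Option (List (String × String)) :=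
  let name_lower := PySem.Str.lower name
  fwAltLoop name_lower (PySem.Str.split₀ name_lower) none none windows

-- ===== PRECONDITION & SPEC =====
def Spec_find_window_by_name_py (windows : List (List (String × String))) (name : String) (out : Option (List (String × String))) : Prop := out = find_window_by_name_py_alt windows name
instance (windows : List (List (String × String))) (name : String) (out : Option (List (String × String))) : Decidable (Spec_find_window_by_name_py windows name out) := by unfold Spec_find_window_by_name_py; infer_instance

-- ===== CLAIM (what is proved, stated in full; the proofs are below) =====
def Claim_equal_find_window_by_name_py : Prop := ∀ (windows : List (List (String × String))) (name : String), Dom_find_window_by_name_py windows name → Spec_find_window_by_name_py windows name (find_window_by_name_py windows name)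

-- ===== LEMMAS AND PROOFS =====
-- the three per-window tests, named for the proofs
def pT (nl : String) (w : List (String × String)) : Bool := PySem.Str.isIn nl (getLower w "title")
def pC (nl : String) (w : List (String × String)) : Bool := PySem.Str.isIn nl (getLower w "class")
def pF (nl : String) (words : List String) (w : List (String × String)) : Bool :=
  words.any (fun word => PySem.Str.isIn word (getLower w "title") || PySem.Str.isIn word (getLower w "class"))

lemma find?_congr' {α : Type} (p q : α → Bool) :
    ∀ l : List α, (∀ x ∈ l, p x = q x) → l.find? p = l.find? q := by
  intro l
  induction l with
  | nil => intro _; rfl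
  | cons x xs ih =>
    intro h
    simp only [List.find?_cons]
    rw [h x (by simp)]
    cases q x
    · exact ih (fun y hy => h y (by simp [hy]))
    · rfl

lemma fwAltLoop_eq (nl : String) (words : List String) :
    ∀ (ws : List (List (String × String))) (fc ff : Option (List (String × String))),
    fwAltLoop nl words fc ff ws =
      match ws.find? (pT nl) with
      | some w => some w
      | none =>
        (fc.or (ws.find? (pC nl))).or
          (ff.or (ws.find? (fun w => !pC nl w && pF nl words w))) := by
  intro ws
  induction ws with
  | nil => intro fc ff; cases fc <;> cases ff <;> rfl
  | cons w rest ih =>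
    intro fc ff
    show (if pT nl w then some w
      else if pC nl w then fwAltLoop nl words (if fc.isNone then some w else fc) ff rest
      else if ff.isNone && pF nl words w then fwAltLoop nl words fc (some w) rest
      else fwAltLoop nl words fc ff rest) = _
    simp only [List.find?_cons]
    cases hT : pT nl w with
    | true => simp [hT]
    | false =>
      simp only [hT, if_false, Bool.false_eq_true]
      cases hC : pC nl w with
      | true =>
        simp only [hC, if_true, ih]
        cases fc with
        | none => cases List.find? (pT nl) rest <;> simp [Option.or]
        | some v => cases List.find? (pT nl) rest <;> simp [Option.or]
      | false =>
        simp only [hC, if_false, Bool.false_eq_true, Bool.not_false, Bool.true_and]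
        cases hF : pF nl words w with
        | false =>
          simp only [hF, Bool.and_false, if_false, ih, Bool.false_eq_true]
        | true =>
          cases ff with
          | some v =>
            simp only [Option.isNone_some, Bool.false_and, if_false, ih, Bool.false_eq_true]
            cases List.find? (pT nl) rest <;> simp
          | none =>
            simp only [Option.isNone_none, Bool.true_and, hF, if_true, ih]
            cases List.find? (pT nl) rest <;> cases fc <;>
              cases hrc : List.find? (pC nl) rest <;> simp [Option.or]

-- ===== VERDICT (by name: the statement is the Claim_ definition above) =====
theorem find_window_by_name_py_spec : Claim_equal_find_window_by_name_py := by
  intro windows name _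
  unfold Spec_find_window_by_name_py find_window_by_name_py find_window_by_name_py_alt
  rw [fwAltLoop_eq]
  show (match windows.find? (pT (PySem.Str.lower name)) with
    | some w => some w
    | none =>
      match windows.find? (pC (PySem.Str.lower name)) with
      | some w => some w
      | none => windows.find? (pF (PySem.Str.lower name) (PySem.Str.split₀ (PySem.Str.lower name)))) = _
  cases windows.find? (pT (PySem.Str.lower name)) with
  | some w => rfl
  | none =>
    simp only [Option.none_or]
    cases hC : windows.find? (pC (PySem.Str.lower name)) with
    | some w => simp [Option.or]
    | none =>
      simp only [Option.none_or]
      rw [find?_congr' (fun w => !pC (PySem.Str.lower name) w && pF (PySem.Str.lower name) (PySem.Str.split₀ (PySem.Str.lower name)) w)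
            (pF (PySem.Str.lower name) (PySem.Str.split₀ (PySem.Str.lower name)))]
      intro x hx
      have hx' := List.find?_eq_none.mp hC x hx
      simp only [Bool.not_eq_true] at hx'
      simp [hx']
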